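-- pv_equiv track=rewrite | github.com/Turnickname/hillel | home7/task4.py | find_min_sequence_position
-- ===== SOURCE A (Python) =====
-- def find_min_sequence_position(arr):
--     min_sum = float('inf')
--     min_position = -1
--
--     for i in range(len(arr) - 9):
--         current_sum = sum(arr[i:i+10])
--
--         if current_sum < min_sum:
--             min_sum = current_sum
--             min_position = i
--
--     return min_position
-- ===== SOURCE B (Python) =====
-- def find_min_sequence_position(arr):
--     n = len(arr)
--     if n < 10:
--         return -1
--     s = sum(arr[:10])
--     best_sum = s
--     best_pos = 0
--     for i in range(1, n - 9):
--         s += arr[i + 9] - arr[i - 1]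
--         if s < best_sum:
--             best_sum = s
--             best_pos = i
--     return best_pos
-- ===== Notes on version B (the rewrite author's own statement) =====
-- stated objective: faster
-- what changed: Replaces re-summing each 10-element slice with a sliding-window running sum that adds the incoming and subtracts the outgoing element.
import Mathlib
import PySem

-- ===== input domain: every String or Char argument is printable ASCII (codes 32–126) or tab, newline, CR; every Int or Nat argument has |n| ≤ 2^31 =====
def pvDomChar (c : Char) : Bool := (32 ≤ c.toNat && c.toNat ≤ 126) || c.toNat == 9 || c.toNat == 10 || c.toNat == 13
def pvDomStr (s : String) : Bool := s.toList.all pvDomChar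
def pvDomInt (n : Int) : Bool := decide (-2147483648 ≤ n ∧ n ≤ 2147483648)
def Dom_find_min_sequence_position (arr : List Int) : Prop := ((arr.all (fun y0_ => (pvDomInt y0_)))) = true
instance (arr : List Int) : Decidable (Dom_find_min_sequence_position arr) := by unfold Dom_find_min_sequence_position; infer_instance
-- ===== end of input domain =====

-- B replaces A's per-position re-summing of each 10-element slice with a sliding-window
-- running sum (add incoming, subtract outgoing element); objective: faster (constant factor).

-- ===== PORT A =====
-- min_sum = float('inf') is modelled as Option Int with none = +inf (any int compares below it).
def find_min_sequence_position (arr : List Int) : Int :=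
  ((PySem.List.pyRange 0 ((arr.length : Int) - 9) 1).foldl
    (fun (st : Option Int × Int) i =>
      let cur := (PySem.List.slice arr (some i) (some (i + 10))).sum
      match st.1 with
      | none => (some cur, i)
      | some m => if cur < m then (some cur, i) else st)
    (none, -1)).2

-- ===== PORT B =====
-- arr[i+9] / arr[i-1]: indices are always in range here, so pyGetD with default 0 is exact.
def find_min_sequence_position_alt (arr : List Int) : Int :=
  let n : Int := arr.length
  if n < 10 then -1
  else
    let s0 := (PySem.List.slice arr none (some 10)).sum
    ((PySem.List.pyRange 1 (n - 9) 1).foldl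
      (fun (st : Int × Int × Int) i =>
        let s := st.1 + PySem.List.pyGetD arr (i + 9) 0 - PySem.List.pyGetD arr (i - 1) 0
        if s < st.2.1 then (s, s, i) else (s, st.2.1, st.2.2))
      (s0, s0, 0)).2.2

-- ===== PRECONDITION & SPEC =====
def Spec_find_min_sequence_position (arr : List Int) (out : Int) : Prop := out = find_min_sequence_position_alt arr
instance (arr : List Int) (out : Int) : Decidable (Spec_find_min_sequence_position arr out) := by unfold Spec_find_min_sequence_position; infer_instance

-- ===== CLAIM (what is proved, stated in full; the proofs are below) =====
def Claim_equal_find_min_sequence_position : Prop := ∀ (arr : List Int), Dom_find_min_sequence_position arr → Spec_find_min_sequence_position arr (find_min_sequence_position arr)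

-- ===== LEMMAS AND PROOFS =====

-- the sum of the 10-element window starting at i
def pvW (arr : List Int) (i : Int) : Int := (PySem.List.slice arr (some i) (some (i + 10))).sum

def pvStepA (arr : List Int) (st : Option Int × Int) (i : Int) : Option Int × Int :=
  let cur := (PySem.List.slice arr (some i) (some (i + 10))).sum
  match st.1 with
  | none => (some cur, i)
  | some m => if cur < m then (some cur, i) else st

def pvStepB (arr : List Int) (st : Int × Int × Int) (i : Int) : Int × Int × Int :=
  let s := st.1 + PySem.List.pyGetD arr (i + 9) 0 - PySem.List.pyGetD arr (i - 1) 0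
  if s < st.2.1 then (s, s, i) else (s, st.2.1, st.2.2)

lemma portA_eq (arr : List Int) :
    find_min_sequence_position arr =
      ((PySem.List.pyRange 0 ((arr.length : Int) - 9) 1).foldl (pvStepA arr) (none, -1)).2 := rfl

lemma portB_eq (arr : List Int) (h : ¬ ((arr.length : Int) < 10)) :
    find_min_sequence_position_alt arr =
      ((PySem.List.pyRange 1 ((arr.length : Int) - 9) 1).foldl (pvStepB arr)
        ((PySem.List.slice arr none (some 10)).sum, (PySem.List.slice arr none (some 10)).sum, 0)).2.2 := by
  unfold find_min_sequence_position_alt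
  rw [if_neg h]
  rfl

-- window sum over Nat indices is drop/take
lemma pvW_natCast (arr : List Int) (j : Nat) :
    pvW arr (j : Int) = ((arr.drop j).take 10).sum := by
  have hc : ((j : Int) + 10) = ((j + 10 : Nat) : Int) := by push_cast; ring
  rw [pvW, hc, PySem.List.slice_natCast]
  have : j + 10 - j = 10 := by omega
  rw [this]

-- sliding-window invariant: moving the window one step right adds the incoming and drops the outgoing element
lemma pvW_slide (arr : List Int) (j : Nat) (h : j + 10 < arr.length) :
    pvW arr ((j : Int) + 1) = pvW arr (j : Int) + arr.getD (j + 10) 0 - arr.getD j 0 := by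
  have hc : ((j : Int) + 1) = ((j + 1 : Nat) : Int) := by push_cast; ring
  rw [hc, pvW_natCast, pvW_natCast]
  have hj : j < arr.length := by omega
  have hdrop : arr.drop j = arr[j] :: arr.drop (j + 1) := List.drop_eq_getElem_cons hj
  have h9 : 9 < (arr.drop (j + 1)).length := by
    rw [List.length_drop]; omega
  have h10 : (10 : Nat) = 9 + 1 := rfl
  have hsum1 : ((arr.drop j).take 10).sum = arr[j] + ((arr.drop (j + 1)).take 9).sum := by
    rw [hdrop, h10, List.take_succ_cons, List.sum_cons]
  have hsum2 : ((arr.drop (j + 1)).take 10).sum = ((arr.drop (j + 1)).take 9).sum + arr[j + 10] := by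
    rw [List.take_add_one, List.getElem?_eq_getElem h9, List.getElem_drop]
    simp [List.sum_append]
  have hgd1 : arr.getD (j + 10) 0 = arr[j + 10] := List.getD_eq_getElem arr 0 (by omega)
  have hgd2 : arr.getD j 0 = arr[j] := List.getD_eq_getElem arr 0 hj
  rw [hsum1, hsum2, hgd1, hgd2]
  ring

-- core correspondence: over a common index range, B's fold (carrying the running sum)
-- determines A's fold state exactly
lemma pvLoop_agree (arr : List Int) :
    ∀ (k : Nat) (a : Int), 1 ≤ a → a + k ≤ (arr.length : Int) - 9 → ∀ (bm p : Int),
      (PySem.List.pyRange a (a + k) 1).foldl (pvStepA arr) (some bm, p) =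
        (some ((PySem.List.pyRange a (a + k) 1).foldl (pvStepB arr) (pvW arr (a - 1), bm, p)).2.1,
         ((PySem.List.pyRange a (a + k) 1).foldl (pvStepB arr) (pvW arr (a - 1), bm, p)).2.2) := by
  intro k
  induction k with
  | zero =>
    intro a _ _ bm p
    simp
  | succ k ih =>
    intro a ha hb bm p
    have hr : a + ((k + 1 : Nat) : Int) = (a + 1) + (k : Int) := by push_cast; ring
    rw [hr, PySem.List.pyRange_one_cons (by omega : a < (a + 1) + (k : Int))]
    simp only [List.foldl_cons]
    obtain ⟨j, hj⟩ : ∃ j : Nat, a = (j : Int) + 1 := by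
      obtain ⟨j, hj⟩ := Int.le.dest (by omega : (0:Int) ≤ a - 1)
      exact ⟨j, by omega⟩
    have hjlen : j + 10 < arr.length := by omega
    -- B's new running sum equals the window sum at a
    have hs : pvW arr (a - 1) + PySem.List.pyGetD arr (a + 9) 0 - PySem.List.pyGetD arr (a - 1) 0
        = pvW arr a := by
      have h1 : a - 1 = (j : Int) := by omega
      have h2 : a + 9 = ((j + 10 : Nat) : Int) := by push_cast; omega
      rw [h1, h2, hj, pvW_slide arr j hjlen, PySem.List.pyGetD_natCast, PySem.List.pyGetD_natCast]
    have hcur : (PySem.List.slice arr (some a) (some (a + 10))).sum = pvW arr a := rfl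
    have ha1 : pvW arr a = pvW arr ((a + 1) - 1) := by norm_num
    by_cases hlt : pvW arr a < bm
    · have e1 : pvStepA arr (some bm, p) a = (some (pvW arr a), a) := by
        simp [pvStepA, hcur, hlt]
      have e2 : pvStepB arr (pvW arr (a - 1), bm, p) a = (pvW arr a, pvW arr a, a) := by
        simp [pvStepB, hs, hlt]
      rw [e1, e2, ha1]
      exact ih (a + 1) (by omega) (by omega) (pvW arr ((a + 1) - 1)) a
    · have e1 : pvStepA arr (some bm, p) a = (some bm, p) := by
        simp [pvStepA, hcur, hlt]
      have e2 : pvStepB arr (pvW arr (a - 1), bm, p) a = (pvW arr a, bm, p) := by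
        simp [pvStepB, hs, hlt]
      rw [e1, e2, ha1]
      exact ih (a + 1) (by omega) (by omega) bm p

-- ===== VERDICT (by name: the statement is the Claim_ definition above) =====
theorem find_min_sequence_position_spec : Claim_equal_find_min_sequence_position := by
  intro arr _
  unfold Spec_find_min_sequence_position
  by_cases hn : (arr.length : Int) < 10
  · -- fewer than 10 elements: A's range is empty, both return -1
    rw [portA_eq, PySem.List.pyRange_one_eq_nil (by omega : (arr.length : Int) - 9 ≤ 0)]
    simp [find_min_sequence_position_alt, hn]
  · rw [portA_eq, portB_eq arr hn]
    obtain ⟨k, hk⟩ := Int.le.dest (by omega : (1:Int) ≤ (arr.length : Int) - 9)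
    have hrange : (arr.length : Int) - 9 = 1 + (k : Int) := by omega
    rw [hrange, PySem.List.pyRange_one_cons (by omega : (0:Int) < 1 + (k : Int))]
    simp only [List.foldl_cons, zero_add]
    have e1 : pvStepA arr (none, -1) 0 = (some (pvW arr 0), 0) := by
      simp [pvStepA]; rfl
    have e2 : (PySem.List.slice arr none (some 10)).sum = pvW arr 0 := by
      rw [pvW]; simp
    rw [e1, e2]
    have key := pvLoop_agree arr k 1 (by omega) (by omega) (pvW arr 0) 0
    have h10 : pvW arr ((1:Int) - 1) = pvW arr 0 := by norm_num
    rw [h10] at key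
    have h1k : (1:Int) + (k : Int) = 1 + (k : Int) := rfl
    rw [key]
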